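-- pv_equiv track=rewrite | github.com/chris7086/CS196 | hw1.py | n_n_times
-- ===== SOURCE A (Python) =====
-- def n_n_times(n):
--     x = 0;
--     y = 0;
--     exp = 0;
--     for i in range (1,n):
--         exp = exp+i
--     exp=exp-1;
--     for i in range (1,n):
--         for j in range (0,i):
--             x=x+i*10**exp;
--             exp=exp-1;
--     return str(x)
-- ===== SOURCE B (Python) =====
-- def n_n_times(n):
--     # Horner-style: append block i (digit run, with carries handled by integer arithmetic)
--     # via shift-and-add with a repunit multiple: one bigint op per block instead of one per digit.
--     x = 0
--     for i in range(1, n):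
--         x = x * 10**i + i * ((10**i - 1) // 9)
--     return str(x)
-- ===== Notes on version B (the rewrite author's own statement) =====
-- stated objective: faster
-- what changed: Replaced the triple nested digit-at-a-time accumulation (one bigint addition per output digit, with a precomputed total exponent) by a single Horner-style shift-and-add pass that appends each block of repeated digits at once using a repunit multiple.
import Mathlib
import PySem

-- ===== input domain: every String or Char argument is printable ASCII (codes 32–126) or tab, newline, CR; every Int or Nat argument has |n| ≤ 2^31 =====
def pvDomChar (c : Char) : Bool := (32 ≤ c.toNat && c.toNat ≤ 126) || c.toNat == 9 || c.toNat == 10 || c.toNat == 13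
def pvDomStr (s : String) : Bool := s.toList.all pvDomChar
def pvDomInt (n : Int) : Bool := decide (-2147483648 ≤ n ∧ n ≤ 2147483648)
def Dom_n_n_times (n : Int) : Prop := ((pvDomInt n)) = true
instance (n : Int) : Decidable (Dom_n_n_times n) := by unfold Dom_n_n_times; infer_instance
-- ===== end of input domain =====

-- B replaces the digit-at-a-time triple loop by a Horner-style single pass (faster: O(n) bigint ops instead of one per output digit).

-- ===== PORT A =====
-- Python's 10**exp is evaluated only while exp ≥ 0 (the inner loop performs exactly
-- exp0 additions, the last one at exp = 0), so 10 ^ exp.toNat is exact on every reached state.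
def n_n_times (n : Int) : String :=
  let exp0 : Int := (PySem.List.pyRange 1 n 1).foldl (fun e i => e + i) 0
  let st : Int × Int :=
    (PySem.List.pyRange 1 n 1).foldl
      (fun st i =>
        (PySem.List.pyRange 0 i 1).foldl
          (fun st _ => (st.1 + i * 10 ^ st.2.toNat, st.2 - 1)) st)
      (0, exp0 - 1)
  PySem.Int.toStr st.1

-- ===== PORT B =====
def n_n_times_alt (n : Int) : String :=
  PySem.Int.toStr
    ((PySem.List.pyRange 1 n 1).foldl
      (fun x i => x * 10 ^ i.toNat + i * PySem.Int.floordiv (10 ^ i.toNat - 1) 9) 0)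

-- ===== PRECONDITION & SPEC =====
def Spec_n_n_times (n : Int) (out : String) : Prop := out = n_n_times_alt n
instance (n : Int) (out : String) : Decidable (Spec_n_n_times n out) := by unfold Spec_n_n_times; infer_instance

-- ===== CLAIM (what is proved, stated in full; the proofs are below) =====
def Claim_equal_n_n_times : Prop := ∀ (n : Int), Dom_n_n_times n → Spec_n_n_times n (n_n_times n)

-- ===== LEMMAS AND PROOFS =====

-- the repunit 11…1 (L ones)
def pvRep : Nat → Int
  | 0 => 0
  | L + 1 => 10 * pvRep L + 1

theorem pvRep_nine (L : Nat) : (10 : Int) ^ L - 1 = 9 * pvRep L := by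
  induction L with
  | zero => simp [pvRep]
  | succ k ih =>
      have h : (10 : Int) ^ (k + 1) - 1 = 10 * (10 ^ k - 1) + 9 := by ring
      rw [h, ih, pvRep]; ring

theorem pvRep_succ' (L : Nat) : pvRep (L + 1) = 10 ^ L + pvRep L := by
  have h := pvRep_nine L
  show 10 * pvRep L + 1 = 10 ^ L + pvRep L
  omega

theorem pvRep_closed (L : Nat) :
    PySem.Int.floordiv (10 ^ L - 1) 9 = pvRep L := by
  rw [pvRep_nine, PySem.Int.floordiv_eq_ediv_of_pos (by norm_num)]
  exact Int.mul_ediv_cancel_left _ (by norm_num)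

theorem pvSum_shift (l : List Int) (c : Int) :
    l.foldl (fun e i => e + i) c = c + l.foldl (fun e i => e + i) 0 := by
  induction l generalizing c with
  | nil => simp
  | cons a t ih => simp only [List.foldl_cons]; rw [ih (c + a), ih (0 + a)]; ring

theorem pvSum_nonneg (l : List Int) (hl : ∀ a ∈ l, 0 ≤ a) :
    0 ≤ l.foldl (fun e i => e + i) 0 := by
  induction l with
  | nil => simp
  | cons a t ih =>
      have ha : 0 ≤ a := hl a (by simp)
      have ht := ih (fun x hx => hl x (by simp [hx]))
      simp only [List.foldl_cons]
      rw [pvSum_shift]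
      omega

-- A's inner loop: the range element is ignored, so the fold is an iterate of (range length) steps
theorem pvInner_fold (i : Int) (l : List Int) (x e : Int)
    (he : (l.length : Int) ≤ e + 1) :
    l.foldl (fun st _ => (st.1 + i * 10 ^ st.2.toNat, st.2 - 1)) (x, e)
      = (x + i * pvRep l.length * 10 ^ (e + 1 - l.length).toNat, e - l.length) := by
  induction l generalizing x e with
  | nil => simp [pvRep]
  | cons a t ih =>
      simp only [List.foldl_cons, List.length_cons]
      have ht : (t.length : Int) ≤ (e - 1) + 1 := by
        simp only [List.length_cons] at he; push_cast at he ⊢; omega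
      rw [ih (x + i * 10 ^ e.toNat) (e - 1) ht]
      have hE : e - 1 + 1 - (t.length : Int) = e - t.length := by ring
      rw [Prod.mk.injEq]
      constructor
      · rw [hE]
        have hsplit : e.toNat = t.length + (e - (t.length : Int)).toNat := by
          simp only [List.length_cons] at he; push_cast at he; omega
        rw [pvRep_succ', hsplit, pow_add]
        push_cast
        ring_nf
      · push_cast; ring

-- B's fold is affine in its accumulator
theorem pvB_affine (l : List Int) (b : Int) (hl : ∀ a ∈ l, 0 ≤ a) :
    l.foldl (fun x i => x * 10 ^ i.toNat + i * PySem.Int.floordiv (10 ^ i.toNat - 1) 9) b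
      = b * 10 ^ (l.foldl (fun e i => e + i) 0).toNat
        + l.foldl (fun x i => x * 10 ^ i.toNat + i * PySem.Int.floordiv (10 ^ i.toNat - 1) 9) 0 := by
  induction l generalizing b with
  | nil => simp
  | cons a t ih =>
      have ha : 0 ≤ a := hl a (by simp)
      have ht : ∀ x ∈ t, 0 ≤ x := fun x hx => hl x (by simp [hx])
      have hst : 0 ≤ t.foldl (fun e i => e + i) 0 := pvSum_nonneg t ht
      simp only [List.foldl_cons]
      rw [ih (b * 10 ^ a.toNat + a * PySem.Int.floordiv (10 ^ a.toNat - 1) 9) ht,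
          ih (0 * 10 ^ a.toNat + a * PySem.Int.floordiv (10 ^ a.toNat - 1) 9) ht,
          pvSum_shift t (0 + a)]
      have hexp : ((0 + a) + t.foldl (fun e i => e + i) 0).toNat
          = a.toNat + (t.foldl (fun e i => e + i) 0).toNat := by omega
      rw [hexp, pow_add]
      ring

-- main invariant for A's outer loop
theorem pvOuter_fold (l : List Int) (x e : Int)
    (hl : ∀ a ∈ l, 0 ≤ a)
    (he : l.foldl (fun s i => s + i) 0 ≤ e + 1) :
    l.foldl
      (fun st i =>
        (PySem.List.pyRange 0 i 1).foldl
          (fun st _ => (st.1 + i * 10 ^ st.2.toNat, st.2 - 1)) st)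
      (x, e)
    = (x + (l.foldl (fun x i => x * 10 ^ i.toNat + i * PySem.Int.floordiv (10 ^ i.toNat - 1) 9) 0)
            * 10 ^ (e + 1 - l.foldl (fun s i => s + i) 0).toNat,
       e - l.foldl (fun s i => s + i) 0) := by
  induction l generalizing x e with
  | nil => simp
  | cons a t ih =>
      have ha : 0 ≤ a := hl a (by simp)
      have ht : ∀ y ∈ t, 0 ≤ y := fun y hy => hl y (by simp [hy])
      have hst : 0 ≤ t.foldl (fun s i => s + i) 0 := pvSum_nonneg t ht
      have hsum : (a :: t).foldl (fun s i => s + i) 0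
          = a + t.foldl (fun s i => s + i) 0 := by
        simp only [List.foldl_cons]; rw [pvSum_shift t (0 + a)]; ring
      rw [hsum] at he
      have hlen : ((PySem.List.pyRange 0 a 1).length : Int) = a := by
        rw [PySem.List.length_pyRange_one]; omega
      have hlenN : (PySem.List.pyRange 0 a 1).length = a.toNat := by omega
      simp only [List.foldl_cons]
      rw [pvInner_fold a (PySem.List.pyRange 0 a 1) x e (by rw [hlen]; omega)]
      rw [ih (x + a * pvRep (PySem.List.pyRange 0 a 1).length
                * 10 ^ (e + 1 - ((PySem.List.pyRange 0 a 1).length : Int)).toNat)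
             (e - ((PySem.List.pyRange 0 a 1).length : Int)) ht (by rw [hlen]; omega)]
      rw [hlenN, Int.toNat_of_nonneg ha]
      have hFB := pvB_affine t (0 * 10 ^ a.toNat + a * PySem.Int.floordiv (10 ^ a.toNat - 1) 9) ht
      rw [hFB, pvRep_closed, pvSum_shift t (0 + a)]
      have hexp : (e + 1 - a).toNat
          = (t.foldl (fun s i => s + i) 0).toNat + (e - a + 1 - t.foldl (fun s i => s + i) 0).toNat := by
        omega
      simp only [zero_add] at *
      rw [Prod.mk.injEq]
      constructor
      · rw [hexp, pow_add]
        have h2 : e - a + 1 - t.foldl (fun s i => s + i) 0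
            = e + 1 - (a + t.foldl (fun s i => s + i) 0) := by ring
        rw [h2]
        ring
      · ring

-- ===== VERDICT (by name: the statement is the Claim_ definition above) =====
theorem n_n_times_spec : Claim_equal_n_n_times := by
  intro n _
  unfold Spec_n_n_times n_n_times n_n_times_alt
  dsimp only
  have hl : ∀ a ∈ PySem.List.pyRange 1 n 1, 0 ≤ a := by
    intro a ha
    rw [PySem.List.mem_pyRange_one] at ha
    omega
  set l := PySem.List.pyRange 1 n 1 with hldef
  set S := l.foldl (fun e i => e + i) 0 with hS
  have he : l.foldl (fun s i => s + i) 0 ≤ (S - 1) + 1 := by rw [← hS]; omega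
  rw [pvOuter_fold l 0 (S - 1) hl he]
  simp only [← hS]
  have : (S - 1 + 1 - S).toNat = 0 := by omega
  rw [this]
  simp
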